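-- pv_equiv track=rewrite | github.com/deysantanu84/python-portfolio | problemSolving/searching/specialInteger.py | specialInteger
-- ===== SOURCE A (Python) =====
-- def binarySearch(prefixSumList, N, B):
--     result = -1
--     start = 1
--     end = N
--     temp = 0
--     while start <= end:
--         mid = start + (end - start) // 2
--         for i in range(mid, N + 1):
--             temp = i
--             if prefixSumList[i] - prefixSumList[i - mid] > B:
--                 temp -= 1
--                 break
--         temp += 1
--         if temp == N + 1:
--             start = mid + 1
--             result = mid
--         else:
--             end = mid - 1
--
--     return result
--
-- def specialInteger(A, B):
--     N = len(A)
--     prefixSumList = []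
--     for i in range(N + 1):
--         prefixSumList.append(0)
--
--     for i in range(N):
--         prefixSumList[i + 1] = prefixSumList[i] + A[i]
--
--     return binarySearch(prefixSumList, N, B)
-- ===== SOURCE B (Python) =====
-- def specialInteger(A, B):
--     # Two-pointer sliding window: find the shortest subarray with sum > B;
--     # the answer is its length minus 1 (or len(A) when no subarray exceeds B).
--     n = len(A)
--     left = 0
--     s = 0
--     shortest = n + 1
--     for right in range(n):
--         s += A[right]
--         while left <= right and s > B:
--             if right - left + 1 < shortest:
--                 shortest = right - left + 1
--             s -= A[left]
--             left += 1
--     ans = shortest - 1 if shortest <= n else n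
--     return ans if ans >= 1 else -1
-- ===== Notes on version B (the rewrite author's own statement) =====
-- stated objective: faster
-- what changed: Replaced the binary search over window lengths (each step rescanning all windows via the prefix-sum list) by a single two-pointer sliding-window pass that finds the shortest subarray with sum > B; the answer is that length minus 1 (or N when none exceeds). Pre_ restricts to the problem's natural domain of non-negative arrays, on which A's monotonicity assumption (longer windows have larger sums) actually holds; outside it A's binary search returns an accidental value.
-- outside the precondition, e.g. on specialInteger([-3, -2], -3): A returns -1, B returns 2
import Mathlib
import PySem

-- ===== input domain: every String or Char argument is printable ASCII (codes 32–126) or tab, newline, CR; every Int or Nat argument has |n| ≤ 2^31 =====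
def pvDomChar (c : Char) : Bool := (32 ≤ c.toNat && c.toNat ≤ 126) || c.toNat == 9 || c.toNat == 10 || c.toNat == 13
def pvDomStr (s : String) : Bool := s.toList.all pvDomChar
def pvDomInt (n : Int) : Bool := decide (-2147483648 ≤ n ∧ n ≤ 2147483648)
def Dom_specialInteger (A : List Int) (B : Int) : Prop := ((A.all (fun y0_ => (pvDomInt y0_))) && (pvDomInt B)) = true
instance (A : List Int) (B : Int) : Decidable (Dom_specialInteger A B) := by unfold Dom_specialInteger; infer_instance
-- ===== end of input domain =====

-- B replaces A's binary search over window lengths by one two-pointer sliding-window pass over the same array (objective: faster; measured).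

-- ===== PORT A =====
-- Every prefixSumList index on an executed path lies in range (mid ∈ [1,N], i ∈ [mid,N]),
-- so pyGetD with default 0 is exact here.
def pvInnerFor (p : List Int) (B mid : Int) (xs : List Int) (temp : Int) : Int :=
  match xs with
  | [] => temp
  | i :: rest =>
      if PySem.List.pyGetD p i 0 - PySem.List.pyGetD p (i - mid) 0 > B then i - 1
      else pvInnerFor p B mid rest i

-- fuel only makes the while-loop total; it is always sufficient at the call site
def pvBsLoop (p : List Int) (N B : Int) (fuel : Nat) (start stop temp result : Int) : Int :=
  match fuel with
  | 0 => result
  | fuel + 1 =>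
    if start ≤ stop then
      let mid := start + PySem.Int.floordiv (stop - start) 2
      let temp1 := pvInnerFor p B mid (PySem.List.pyRange mid (N + 1) 1) temp + 1
      if temp1 = N + 1 then pvBsLoop p N B fuel (mid + 1) stop temp1 mid
      else pvBsLoop p N B fuel start (mid - 1) temp1 result
    else result

def binarySearch (p : List Int) (N B : Int) : Int :=
  pvBsLoop p N B (N + 1).toNat 1 N 0 (-1)

def specialInteger (A : List Int) (B : Int) : Int :=
  let N : Int := (A.length : Int)
  let p0 := List.foldl (fun (acc : List Int) (_ : Int) => acc ++ [(0 : Int)]) [] (PySem.List.pyRange 0 (N + 1) 1)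
  let p := List.foldl (fun (acc : List Int) (i : Int) =>
      acc.set (i + 1).toNat (PySem.List.pyGetD acc i 0 + PySem.List.pyGetD A i 0)) p0 (PySem.List.pyRange 0 N 1)
  binarySearch p N B

-- ===== PORT B =====
-- fuel only makes the while-loop total; it is always sufficient at the call site
def pvPopLoop (A : List Int) (B right left s shortest : Int) (fuel : Nat) : Int × Int × Int :=
  match fuel with
  | 0 => (left, s, shortest)
  | fuel + 1 =>
    if left ≤ right ∧ s > B then
      pvPopLoop A B right (left + 1) (s - PySem.List.pyGetD A left 0)
        (if right - left + 1 < shortest then right - left + 1 else shortest) fuel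
    else (left, s, shortest)

def specialInteger_alt (A : List Int) (B : Int) : Int :=
  let n : Int := (A.length : Int)
  let st := List.foldl (fun (st : Int × Int × Int) (right : Int) =>
      pvPopLoop A B right st.1 (st.2.1 + PySem.List.pyGetD A right 0) st.2.2 (A.length + 1))
    (0, 0, n + 1) (PySem.List.pyRange 0 n 1)
  let ans := if st.2.2 ≤ n then st.2.2 - 1 else n
  if ans ≥ 1 then ans else -1

-- ===== PRECONDITION & SPEC =====
-- Pre_ narrows to the problem's natural domain: non-negative entries. A also returns on arrays with
-- negative entries, but there its binary search runs on a non-monotone predicate and the returned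
-- value is an accident of the search order (e.g. A = [-3,-2], B = -3: A returns -1, B returns 2).
def Pre_specialInteger (A : List Int) (B : Int) : Prop := ∀ x ∈ A, 0 ≤ x
instance (A : List Int) (B : Int) : Decidable (Pre_specialInteger A B) := by
  unfold Pre_specialInteger; infer_instance

def pvWitness_specialInteger : List Int × Int := ([1, 2, 3], 3)

def Spec_specialInteger (A : List Int) (B : Int) (out : Int) : Prop := out = specialInteger_alt A B
instance (A : List Int) (B : Int) (out : Int) : Decidable (Spec_specialInteger A B out) := by
  unfold Spec_specialInteger; infer_instance

-- ===== CLAIM (what is proved, stated in full; the proofs are below) =====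
def Claim_equal_specialInteger : Prop := ∀ (A : List Int) (B : Int), Dom_specialInteger A B → Pre_specialInteger A B → Spec_specialInteger A B (specialInteger A B)

-- ===== LEMMAS AND PROOFS =====

-- prefix sum of the first k entries
def pvPf (A : List Int) (k : Nat) : Int := (A.take k).sum

-- "some window of length L (1 ≤ L) has sum > B"
def pvNotOk (A : List Int) (B : Int) (L : Nat) : Prop :=
  ∃ j : Nat, j + L ≤ A.length ∧ pvPf A (j + L) - pvPf A j > B

lemma pvPf_succ (A : List Int) (m : Nat) (h : m < A.length) :
    pvPf A (m + 1) = pvPf A m + A[m] := by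
  unfold pvPf
  rw [List.take_add_one, List.sum_append, List.getElem?_eq_getElem h]
  simp

lemma pvPf_mono (A : List Int) (hA : ∀ x ∈ A, 0 ≤ x) (j k : Nat) (hjk : j ≤ k)
    (hk : k ≤ A.length) : pvPf A j ≤ pvPf A k := by
  induction k with
  | zero => interval_cases j; rfl
  | succ k ih =>
      rcases Nat.lt_or_ge j (k + 1) with h | h
      · have h1 : pvPf A j ≤ pvPf A k := ih (by omega) (by omega)
        have h2 := pvPf_succ A k (by omega)
        have h3 : (0:Int) ≤ A[k]'(by omega) := hA _ (List.getElem_mem _)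
        omega
      · have : j = k + 1 := by omega
        simp [this]

lemma pvNotOk_ext (A : List Int) (B : Int) (hA : ∀ x ∈ A, 0 ≤ x) (L L' : Nat)
    (h : pvNotOk A B L) (hLL : L ≤ L') (hL' : L' ≤ A.length) : pvNotOk A B L' := by
  obtain ⟨j, hj, hx⟩ := h
  refine ⟨min j (A.length - L'), by omega, ?_⟩
  have h1 : pvPf A (min j (A.length - L')) ≤ pvPf A j :=
    pvPf_mono A hA _ _ (by omega) (by omega)
  have h2 : pvPf A (j + L) ≤ pvPf A (min j (A.length - L') + L') :=
    pvPf_mono A hA _ _ (by omega) (by omega)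
  omega


-- ---------- A-side: the prefix-sum list ----------

lemma pvBuild0 (l : List Int) (acc : List Int) :
    List.foldl (fun acc _ => acc ++ [(0:Int)]) acc l = acc ++ List.replicate l.length 0 := by
  induction l generalizing acc with
  | nil => simp
  | cons x xs ih => simp [ih, List.replicate_succ]

lemma pvBuildInv (A : List Int) : ∀ t : Nat, t ≤ A.length →
    List.foldl (fun (acc : List Int) (i : Int) =>
        acc.set (i + 1).toNat (PySem.List.pyGetD acc i 0 + PySem.List.pyGetD A i 0))
      (List.replicate (A.length + 1) 0) (PySem.List.pyRange 0 (t:Int) 1)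
    = (List.range (A.length + 1)).map (fun k => if k ≤ t then pvPf A k else 0) := by
  intro t
  induction t with
  | zero =>
      intro _
      rw [show ((0:Nat):Int) = 0 by norm_num, PySem.List.pyRange_one_eq_nil (by omega)]
      simp only [List.foldl_nil]
      apply List.ext_getElem (by simp)
      intro i h1 h2
      simp only [List.getElem_replicate, List.getElem_map, List.getElem_range]
      split
      · next h => interval_cases i; simp [pvPf]
      · rfl
  | succ t ih =>
      intro ht
      have e1 : ((t + 1 : Nat) : Int) = (t:Int) + 1 := by push_cast; ring
      rw [e1, PySem.List.pyRange_one_succ_right (by positivity), List.foldl_append,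
        ih (by omega)]
      simp only [List.foldl_cons, List.foldl_nil]
      have hidx : ((t:Int) + 1).toNat = t + 1 := by omega
      have hget1 : PySem.List.pyGetD
          (List.map (fun k => if k ≤ t then pvPf A k else 0) (List.range (A.length + 1))) (t:Int) 0
          = pvPf A t := by
        rw [PySem.List.pyGetD_natCast,
          List.getD_eq_getElem _ _ (by simpa using by omega)]
        simp
      have hget2 : PySem.List.pyGetD A (t:Int) 0 = A[t]'(by omega) := by
        rw [PySem.List.pyGetD_natCast, List.getD_eq_getElem _ _ (by omega)]
      rw [hidx, hget1, hget2]
      apply List.ext_getElem (by simp)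
      intro i h1 h2
      rw [List.getElem_set]
      by_cases hit : i = t + 1
      · subst hit
        have hlen : t + 1 < (List.range (A.length + 1)).length := by simpa using by omega
        simp only [List.getElem_map, List.getElem_range, reduceIte]
        have := pvPf_succ A t (by simp at h2; omega)
        simp [this]
      · rw [if_neg (by omega)]
        simp only [List.getElem_map, List.getElem_range]
        by_cases hle : i ≤ t
        · rw [if_pos hle, if_pos (by omega)]
        · rw [if_neg hle, if_neg (by omega)]

-- ---------- A-side: the inner for loop ----------

lemma pvInnerFor_all (A p : List Int) (B : Int)
    (hp : ∀ i : Int, 0 ≤ i → i ≤ (A.length : Int) → PySem.List.pyGetD p i 0 = pvPf A i.toNat)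
    (mid : Int) (h1 : 1 ≤ mid) :
    ∀ (d : Nat) (a temp : Int), ((A.length : Int) - a).toNat = d → mid ≤ a → a ≤ (A.length : Int) →
    (∀ i : Int, a ≤ i → i ≤ (A.length : Int) → pvPf A i.toNat - pvPf A (i - mid).toNat ≤ B) →
    pvInnerFor p B mid (PySem.List.pyRange a ((A.length : Int) + 1) 1) temp = (A.length : Int) := by
  intro d
  induction d with
  | zero =>
      intro a temp hd hma han hgood
      have ha : a = (A.length : Int) := by omega
      subst ha
      rw [PySem.List.pyRange_one_cons (by omega)]
      simp only [pvInnerFor]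
      rw [hp _ (by omega) (by omega), hp _ (by omega) (by omega),
        if_neg (by have := hgood _ le_rfl le_rfl; omega)]
      rw [PySem.List.pyRange_one_eq_nil (by omega)]
      rfl
  | succ d ihd =>
      intro a temp hd hma han hgood
      have ha : a < (A.length : Int) := by omega
      rw [PySem.List.pyRange_one_cons (by omega)]
      simp only [pvInnerFor]
      rw [hp _ (by omega) (by omega), hp _ (by omega) (by omega),
        if_neg (by have := hgood _ le_rfl (by omega); omega)]
      exact ihd (a + 1) a (by omega) (by omega) (by omega)
        (fun i hi1 hi2 => hgood i (by omega) hi2)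

lemma pvInnerFor_bad (A p : List Int) (B : Int)
    (hp : ∀ i : Int, 0 ≤ i → i ≤ (A.length : Int) → PySem.List.pyGetD p i 0 = pvPf A i.toNat)
    (mid : Int) (h1 : 1 ≤ mid) :
    ∀ (d : Nat) (a temp : Int), ((A.length : Int) - a).toNat = d → mid ≤ a → a ≤ (A.length : Int) →
    (∃ i : Int, a ≤ i ∧ i ≤ (A.length : Int) ∧ pvPf A i.toNat - pvPf A (i - mid).toNat > B) →
    pvInnerFor p B mid (PySem.List.pyRange a ((A.length : Int) + 1) 1) temp < (A.length : Int) := by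
  intro d
  induction d with
  | zero =>
      intro a temp hd hma han hbad
      obtain ⟨i, hia, hiN, hx⟩ := hbad
      have ha : a = (A.length : Int) := by omega
      have hiA : i = (A.length : Int) := by omega
      subst ha
      rw [PySem.List.pyRange_one_cons (by omega)]
      simp only [pvInnerFor]
      rw [hp _ (by omega) (by omega), hp _ (by omega) (by omega),
        if_pos (by rw [hiA] at hx; omega)]
      omega
  | succ d ihd =>
      intro a temp hd hma han hbad
      obtain ⟨i, hia, hiN, hx⟩ := hbad
      have ha : a < (A.length : Int) := by omega
      rw [PySem.List.pyRange_one_cons (by omega)]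
      simp only [pvInnerFor]
      rw [hp _ (by omega) (by omega), hp _ (by omega) (by omega)]
      by_cases hc : pvPf A a.toNat - pvPf A (a - mid).toNat > B
      · rw [if_pos hc]; omega
      · rw [if_neg hc]
        have hine : i ≠ a := by
          intro he; subst he; exact hc hx
        exact ihd (a + 1) a (by omega) (by omega) (by omega) ⟨i, by omega, hiN, hx⟩

-- ---------- A-side: the binary-search loop ----------

def pvBsPost (A : List Int) (B r : Int) : Prop :=
  (r = -1 ∧ ∀ L : Nat, 1 ≤ L → L ≤ A.length → pvNotOk A B L) ∨
  (1 ≤ r ∧ r ≤ (A.length : Int) ∧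
    (∀ L : Nat, 1 ≤ L → (L:Int) ≤ r → ¬ pvNotOk A B L) ∧
    (∀ L : Nat, r < (L:Int) → L ≤ A.length → pvNotOk A B L))

lemma pvBsLoop_succ (p : List Int) (N B : Int) (d : Nat) (start stop temp result : Int) :
    pvBsLoop p N B (d + 1) start stop temp result =
      if start ≤ stop then
        let mid := start + PySem.Int.floordiv (stop - start) 2
        let temp1 := pvInnerFor p B mid (PySem.List.pyRange mid (N + 1) 1) temp + 1
        if temp1 = N + 1 then pvBsLoop p N B d (mid + 1) stop temp1 mid
        else pvBsLoop p N B d start (mid - 1) temp1 result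
      else result := rfl

lemma pvPopLoop_succ (A : List Int) (B right left s shortest : Int) (d : Nat) :
    pvPopLoop A B right left s shortest (d + 1) =
      if left ≤ right ∧ s > B then
        pvPopLoop A B right (left + 1) (s - PySem.List.pyGetD A left 0)
          (if right - left + 1 < shortest then right - left + 1 else shortest) d
      else (left, s, shortest) := rfl

lemma pvBs_exit (A : List Int) (B : Int) (lo hi res : Int)
    (h2 : hi ≤ (A.length : Int)) (h3 : lo ≤ hi + 1) (hx : hi < lo)
    (inv4 : ∀ L : Nat, 1 ≤ L → (L:Int) < lo → ¬ pvNotOk A B L)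
    (inv5 : ∀ L : Nat, hi < (L:Int) → L ≤ A.length → pvNotOk A B L)
    (invr : (2 ≤ lo ∧ res = lo - 1) ∨ (lo = 1 ∧ res = -1)) :
    pvBsPost A B res := by
  rcases invr with ⟨h2lo, hres⟩ | ⟨hlo1, hres⟩
  · right
    refine ⟨by omega, by omega, ?_, ?_⟩
    · intro L hL1 hL2; exact inv4 L hL1 (by omega)
    · intro L hL1 hL2; exact inv5 L (by omega) hL2
  · left
    refine ⟨hres, fun L hL1 hL2 => inv5 L (by omega) hL2⟩

lemma pvBs_main (A p : List Int) (B : Int) (hA : ∀ x ∈ A, 0 ≤ x)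
    (hp : ∀ i : Int, 0 ≤ i → i ≤ (A.length : Int) → PySem.List.pyGetD p i 0 = pvPf A i.toNat) :
    ∀ (d : Nat) (lo hi temp res : Int), (hi - lo + 1).toNat ≤ d →
    1 ≤ lo → hi ≤ (A.length : Int) → lo ≤ hi + 1 →
    (∀ L : Nat, 1 ≤ L → (L:Int) < lo → ¬ pvNotOk A B L) →
    (∀ L : Nat, hi < (L:Int) → L ≤ A.length → pvNotOk A B L) →
    ((2 ≤ lo ∧ res = lo - 1) ∨ (lo = 1 ∧ res = -1)) →
    pvBsPost A B (pvBsLoop p (A.length : Int) B d lo hi temp res) := by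
  intro d
  induction d with
  | zero =>
      intro lo hi temp res hd h1 h2 h3 inv4 inv5 invr
      exact pvBs_exit A B lo hi res h2 h3 (by omega) inv4 inv5 invr
  | succ d ihd =>
      intro lo hi temp res hd h1 h2 h3 inv4 inv5 invr
      by_cases hle : lo ≤ hi
      · rw [pvBsLoop_succ, if_pos hle]
        simp only []
        have hfd : PySem.Int.floordiv (hi - lo) 2 = (hi - lo) / 2 :=
          PySem.Int.floordiv_eq_ediv_of_pos (by norm_num)
        have hmb : lo ≤ lo + PySem.Int.floordiv (hi - lo) 2 ∧
            lo + PySem.Int.floordiv (hi - lo) 2 ≤ hi := by omega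
        generalize hm : lo + PySem.Int.floordiv (hi - lo) 2 = m at *
        have hm1 : 1 ≤ m := by omega
        have hmN : m ≤ (A.length : Int) := by omega
        have hmt : ((m.toNat : Nat) : Int) = m := Int.toNat_of_nonneg (by omega)
        by_cases hok : pvNotOk A B m.toNat
        · have hbad : ∃ i : Int, m ≤ i ∧ i ≤ (A.length : Int) ∧
              pvPf A i.toNat - pvPf A (i - m).toNat > B := by
            obtain ⟨j, hj, hx⟩ := hok
            refine ⟨((j + m.toNat : Nat) : Int), by omega, by push_cast; omega, ?_⟩
            have e1 : (((j + m.toNat : Nat) : Int)).toNat = j + m.toNat := by omega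
            have e2 : (((j + m.toNat : Nat) : Int) - m).toNat = j := by omega
            rw [e1, e2]; exact hx
          have hlt := pvInnerFor_bad A p B hp m hm1 ((A.length : Int) - m).toNat m temp
            rfl le_rfl hmN hbad
          rw [if_neg (by omega)]
          exact ihd lo (m - 1) _ res (by omega) h1 (by omega) (by omega) inv4
            (fun L hL1 hL2 => by
              by_cases hLm : m ≤ (L:Int)
              · exact pvNotOk_ext A B hA m.toNat L hok (by omega) hL2
              · exact inv5 L (by omega) hL2)
            invr
        · have hgood : ∀ i : Int, m ≤ i → i ≤ (A.length : Int) →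
              pvPf A i.toNat - pvPf A (i - m).toNat ≤ B := by
            intro i hi1 hi2
            by_contra hgt
            exact hok ⟨(i - m).toNat, by omega, by
              have e1 : (i - m).toNat + m.toNat = i.toNat := by omega
              rw [e1]; omega⟩
          have heq := pvInnerFor_all A p B hp m hm1 ((A.length : Int) - m).toNat m temp
            rfl le_rfl hmN hgood
          rw [if_pos (by omega)]
          exact ihd (m + 1) hi _ m (by omega) (by omega) h2 (by omega)
            (fun L hL1 hL2 => by
              intro hno
              exact hok (pvNotOk_ext A B hA L m.toNat hno (by omega) (by omega)))
            inv5 (Or.inl ⟨by omega, by omega⟩)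
      · rw [pvBsLoop_succ, if_neg hle]
        exact pvBs_exit A B lo hi res h2 h3 (by omega) inv4 inv5 invr

-- ---------- B-side: the pop loop ----------

lemma pvPop_main (A : List Int) (B : Int) (hA : ∀ x ∈ A, 0 ≤ x) (r : Nat) (hr : r < A.length) :
    ∀ (d : Nat) (l s sh : Int), ((r:Int) + 1 - l).toNat ≤ d →
    0 ≤ l → l ≤ (r:Int) + 1 → s = pvPf A (r + 1) - pvPf A l.toNat →
    (let out := pvPopLoop A B (r:Int) l s sh d
     (l ≤ out.1 ∧ out.1 ≤ (r:Int) + 1) ∧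
     out.2.1 = pvPf A (r + 1) - pvPf A out.1.toNat ∧
     (out.1 = (r:Int) + 1 ∨ out.2.1 ≤ B) ∧
     out.2.2 ≤ sh ∧
     (out.1 = l ∨ out.2.2 ≤ (r:Int) + 1 - out.1 + 1) ∧
     (out.2.2 = sh ∨ ∃ j : Nat, j < r + 1 ∧ pvPf A (r + 1) - pvPf A j > B ∧ out.2.2 = ((r:Int) + 1) - j) ∧
     (∀ j : Nat, l ≤ (j:Int) → j < r + 1 → pvPf A (r + 1) - pvPf A j > B → out.2.2 ≤ ((r:Int) + 1) - j)) := by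
  intro d
  induction d with
  | zero =>
      intro l s sh hd h0 hl hs
      have hl' : l = (r:Int) + 1 := by omega
      rw [show pvPopLoop A B (r:Int) l s sh 0 = (l, s, sh) from rfl]
      refine ⟨⟨le_rfl, hl⟩, hs, Or.inl hl', le_rfl, Or.inl rfl, Or.inl rfl, ?_⟩
      intro j hj1 hj2 _
      omega
  | succ d ihd =>
      intro l s sh hd h0 hl hs
      by_cases hc : l ≤ (r:Int) ∧ s > B
      · obtain ⟨hlr, hsB⟩ := hc
        have hlt : l.toNat < A.length := by omega
        have hgl : PySem.List.pyGetD A l 0 = A[l.toNat]'hlt :=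
          PySem.List.pyGetD_eq_getElem A (i := l) 0 (by omega) (by omega)
        have hs1 : s - PySem.List.pyGetD A l 0 = pvPf A (r + 1) - pvPf A (l + 1).toNat := by
          rw [hgl, show (l + 1).toNat = l.toNat + 1 by omega, pvPf_succ A l.toNat hlt]
          omega
        rw [pvPopLoop_succ, if_pos ⟨hlr, hsB⟩]
        have hsh1 : (if (r:Int) - l + 1 < sh then (r:Int) - l + 1 else sh) ≤ sh ∧
            (if (r:Int) - l + 1 < sh then (r:Int) - l + 1 else sh) ≤ (r:Int) - l + 1 := by
          split <;> omega
        obtain ⟨o1, o2, o3, o4, o5a, o5b, o6⟩ :=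
          ihd (l + 1) (s - PySem.List.pyGetD A l 0)
            (if (r:Int) - l + 1 < sh then (r:Int) - l + 1 else sh)
            (by omega) (by omega) (by omega) hs1
        refine ⟨⟨by omega, o1.2⟩, o2, o3, by omega, Or.inr ?_, ?_, ?_⟩
        · rcases o5a with h | h
          · rw [h]; omega
          · exact h
        · rcases o5b with h | h
          · by_cases hrec : (r:Int) - l + 1 < sh
            · refine Or.inr ⟨l.toNat, by omega, by omega, ?_⟩
              rw [h, if_pos hrec]; omega
            · left; rw [h, if_neg hrec]
          · exact Or.inr h
        · intro j hj1 hj2 hj3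
          by_cases hje : (j : Int) = l
          · omega
          · exact o6 j (by omega) hj2 hj3
      · rw [pvPopLoop_succ, if_neg hc]
        refine ⟨⟨le_rfl, hl⟩, hs, ?_, le_rfl, Or.inl rfl, Or.inl rfl, ?_⟩
        · by_cases hle : l = (r:Int) + 1
          · exact Or.inl hle
          · right
            show s ≤ B
            rcases not_and_or.mp hc with h | h <;> omega
        · intro j hj1 hj2 hj3
          have hsB : ¬ s > B := by
            intro h; exact hc ⟨by omega, h⟩
          have hmono : pvPf A l.toNat ≤ pvPf A j :=
            pvPf_mono A hA l.toNat j (by omega) (by omega)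
          show sh ≤ (r:Int) + 1 - j
          omega

-- ---------- B-side: the main loop invariant ----------

def pvInv (A : List Int) (B : Int) (k : Nat) (st : Int × Int × Int) : Prop :=
  (0 ≤ st.1 ∧ st.1 ≤ (k:Int)) ∧
  st.2.1 = pvPf A k - pvPf A st.1.toNat ∧
  (st.1 = (k:Int) ∨ st.2.1 ≤ B) ∧
  (1 ≤ st.2.2 ∧ st.2.2 ≤ (A.length : Int) + 1) ∧
  (st.2.2 ≤ (A.length : Int) → ∃ j m : Nat, j < m ∧ m ≤ k ∧ ((m:Int) - j = st.2.2) ∧ pvPf A m - pvPf A j > B) ∧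
  (∀ j m : Nat, j < m → m ≤ k → pvPf A m - pvPf A j > B → st.2.2 ≤ (m:Int) - j) ∧
  (1 ≤ st.1 → st.2.2 ≤ (k:Int) - st.1 + 1)

lemma pvOuter_main (A : List Int) (B : Int) (hA : ∀ x ∈ A, 0 ≤ x) :
    ∀ k : Nat, k ≤ A.length →
    pvInv A B k (List.foldl (fun (st : Int × Int × Int) (right : Int) =>
        pvPopLoop A B right st.1 (st.2.1 + PySem.List.pyGetD A right 0) st.2.2 (A.length + 1))
      (0, 0, (A.length : Int) + 1) (PySem.List.pyRange 0 (k:Int) 1)) := by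
  intro k
  induction k with
  | zero =>
      intro _
      rw [show ((0:Nat):Int) = 0 by norm_num, PySem.List.pyRange_one_eq_nil le_rfl]
      simp only [List.foldl_nil]
      refine ⟨⟨le_rfl, le_rfl⟩, by simp [pvPf], Or.inl rfl,
        ⟨by show (1:Int) ≤ (A.length : Int) + 1; omega, le_rfl⟩, ?_, ?_, ?_⟩
      · intro h
        exact absurd h (by show ¬ ((A.length : Int) + 1 ≤ (A.length : Int)); omega)
      · intro j m hjm hm _
        omega
      · intro h
        exact absurd h (by show ¬ ((1:Int) ≤ 0); omega)
  | succ k ih =>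
      intro hk
      have hk' : k < A.length := by omega
      have e1 : ((k + 1 : Nat) : Int) = (k:Int) + 1 := by push_cast; ring
      rw [e1, PySem.List.pyRange_one_succ_right (by positivity), List.foldl_append]
      obtain ⟨⟨ia0, ia1⟩, ib, ic, ⟨id1, id2⟩, ie, if', ig⟩ := ih (by omega)
      simp only [List.foldl_cons, List.foldl_nil]
      generalize hst : List.foldl (fun (st : Int × Int × Int) (right : Int) =>
          pvPopLoop A B right st.1 (st.2.1 + PySem.List.pyGetD A right 0) st.2.2 (A.length + 1))
        (0, 0, (A.length : Int) + 1) (PySem.List.pyRange 0 (k:Int) 1) = st at *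
      obtain ⟨l, s, sh⟩ := st
      simp only at ia0 ia1 ib ic id1 id2 ie if' ig ⊢
      have hgk : PySem.List.pyGetD A (k:Int) 0 = A[k]'hk' := by
        have := PySem.List.pyGetD_eq_getElem A (i := (k:Int)) 0 (by omega) (by omega)
        simpa using this
      have hsmid : s + PySem.List.pyGetD A (k:Int) 0 = pvPf A (k + 1) - pvPf A l.toNat := by
        rw [hgk, ib, pvPf_succ A k hk']
        ring
      obtain ⟨o1, o2, o3, o4, o5a, o5b, o6⟩ :=
        pvPop_main A B hA k hk' (A.length + 1) l
          (s + PySem.List.pyGetD A (k:Int) 0) sh (by omega) (by omega) (by omega) hsmid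
      generalize hout : pvPopLoop A B (k:Int) l (s + PySem.List.pyGetD A (k:Int) 0) sh
        (A.length + 1) = out at *
      refine ⟨⟨by omega, by push_cast; omega⟩, o2, ?_, ?_, ?_, ?_, ?_⟩
      · rcases o3 with h | h
        · left; push_cast; omega
        · right; exact h
      · constructor
        · rcases o5b with h | h
          · omega
          · obtain ⟨j, hj1, _, hj3⟩ := h
            omega
        · omega
      · intro hle
        rcases o5b with h | h
        · obtain ⟨j, m, hjm, hm, hms, hx⟩ := ie (by omega)
          exact ⟨j, m, hjm, by omega, by omega, hx⟩
        · obtain ⟨j, hj1, hj2, hj3⟩ := h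
          exact ⟨j, k + 1, by omega, le_rfl, by push_cast; omega, hj2⟩
      · intro j m hjm hm hx
        rcases Nat.lt_or_ge m (k + 1) with hmk | hmk
        · have := if' j m hjm (by omega) hx
          omega
        · have hmek : m = k + 1 := by omega
          subst hmek
          by_cases hjl : l ≤ (j:Int)
          · have := o6 j hjl (by omega) hx
            push_cast
            omega
          · have hl1 : 1 ≤ l := by omega
            have := ig hl1
            push_cast
            omega
      · intro h1'
        rcases o5a with h | h
        · rw [h] at h1' ⊢
          have := ig h1'
          push_cast
          omega
        · push_cast
          omega

-- ===== VERDICT (by name: the statement is the Claim_ definition above) =====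
lemma pvFinal (A : List Int) (B : Int) (hA : ∀ x ∈ A, 0 ≤ x) :
    specialInteger A B = specialInteger_alt A B := by
  -- ---- the A side ----
  have hp0 : List.foldl (fun (acc : List Int) (_ : Int) => acc ++ [(0 : Int)]) []
      (PySem.List.pyRange 0 ((A.length : Int) + 1) 1) = List.replicate (A.length + 1) 0 := by
    rw [pvBuild0]
    simp [PySem.List.length_pyRange_one]
  have hbuild := pvBuildInv A A.length le_rfl
  have hp : ∀ i : Int, 0 ≤ i → i ≤ (A.length : Int) →
      PySem.List.pyGetD ((List.range (A.length + 1)).map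
        (fun k => if k ≤ A.length then pvPf A k else 0)) i 0 = pvPf A i.toNat := by
    intro i h0 h1
    rw [show i = ((i.toNat : Nat) : Int) by omega, PySem.List.pyGetD_natCast,
      List.getD_eq_getElem _ _ (by simp; omega)]
    simp only [List.getElem_map, List.getElem_range, Int.toNat_natCast]
    rw [if_pos (by omega)]
  have hLHS : specialInteger A B =
      pvBsLoop ((List.range (A.length + 1)).map
        (fun k => if k ≤ A.length then pvPf A k else 0)) (A.length : Int) B
        ((A.length : Int) + 1).toNat 1 (A.length : Int) 0 (-1) := by
    rw [specialInteger]
    rw [hp0, hbuild, binarySearch]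
  have hbs := pvBs_main A _ B hA hp ((A.length : Int) + 1).toNat 1 (A.length : Int) 0 (-1)
    (by omega) le_rfl le_rfl (by omega)
    (fun L hL1 hL2 => absurd hL2 (by omega))
    (fun L hL1 hL2 => absurd hL1 (by omega))
    (Or.inr ⟨rfl, rfl⟩)
  rw [← hLHS] at hbs
  -- ---- the B side ----
  have hinv := pvOuter_main A B hA A.length le_rfl
  generalize hst : List.foldl (fun (st : Int × Int × Int) (right : Int) =>
      pvPopLoop A B right st.1 (st.2.1 + PySem.List.pyGetD A right 0) st.2.2 (A.length + 1))
    (0, 0, (A.length : Int) + 1) (PySem.List.pyRange 0 ((A.length : Nat) : Int) 1) = st at hinv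
  have hRHS : specialInteger_alt A B =
      (if (if st.2.2 ≤ (A.length : Int) then st.2.2 - 1 else (A.length : Int)) ≥ 1
       then (if st.2.2 ≤ (A.length : Int) then st.2.2 - 1 else (A.length : Int)) else -1) := by
    rw [specialInteger_alt]
    rw [hst]
  obtain ⟨_, _, _, ⟨id1, id2⟩, ie, if', _⟩ := hinv
  -- S := st.2.2 characterises pvNotOk on [1, n]
  have hOkIff : ∀ L : Nat, 1 ≤ L → L ≤ A.length → (pvNotOk A B L ↔ st.2.2 ≤ (L:Int)) := by
    intro L hL1 hL2
    constructor
    · rintro ⟨j, hj, hx⟩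
      have := if' j (j + L) (by omega) (by omega) hx
      push_cast at this
      omega
    · intro hS
      obtain ⟨j, m, hjm, hm, hms, hx⟩ := ie (by omega)
      have hbase : pvNotOk A B (m - j) := by
        refine ⟨j, by omega, ?_⟩
        rw [show j + (m - j) = m by omega]
        exact hx
      exact pvNotOk_ext A B hA (m - j) L hbase (by omega) hL2
  rw [hRHS]
  rcases hbs with ⟨hr, hall⟩ | ⟨hr1, hr2, hOk, hNot⟩
  · rw [hr]
    rcases Nat.eq_zero_or_pos A.length with hn0 | hn1
    · split_ifs <;> omega
    · have hS1 : st.2.2 ≤ 1 := (hOkIff 1 le_rfl (by omega)).mp (hall 1 le_rfl (by omega))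
      split_ifs <;> omega
  · have hOkr : ¬ pvNotOk A B (specialInteger A B).toNat :=
      hOk (specialInteger A B).toNat (by omega) (by omega)
    have hSgt : st.2.2 > specialInteger A B := by
      by_contra h
      exact hOkr ((hOkIff (specialInteger A B).toNat (by omega) (by omega)).mpr (by omega))
    rcases lt_or_eq_of_le hr2 with hrN | hrN
    · have hS2 : st.2.2 ≤ ((specialInteger A B).toNat + 1 : Nat) :=
        (hOkIff ((specialInteger A B).toNat + 1) (by omega) (by omega)).mp
          (hNot ((specialInteger A B).toNat + 1) (by push_cast; omega) (by omega))
      push_cast at hS2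
      split_ifs <;> omega
    · split_ifs <;> omega

theorem specialInteger_spec : Claim_equal_specialInteger := by
  intro A B _ hpre
  unfold Spec_specialInteger
  exact pvFinal A B hpre
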